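-- pv_equiv track=rewrite | github.com/juliapazdziorek/Advent-of-Code | 2025/day_4/main.py | count_rolls_removed
-- ===== SOURCE A (Python) =====
-- ADJACENT_POSITIONS = [
--     (-1, -1),
--     (-1, 0),
--     (-1, 1),
--     (0, -1),
--     (0, 1),
--     (1, -1),
--     (1, 0),
--     (1, 1),
-- ]
--
-- def find_rolls_positions(grid: list[list[str]]) -> list[tuple[int, int]]:
--     rolls_positions = []
--     for i in range(len(grid)):
--         for j in range(len(grid[i])):
--             if grid[i][j] == '@':
--                 rolls_positions.append((i,j))
--
--     return rolls_positions
--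
-- def check_if_accessible(grid: list[list[str]], roll: tuple[int, int]) -> bool:
--     adjacent_rolls = 0
--     for position in ADJACENT_POSITIONS:
--         new_position = (roll[0] + position[0], roll[1] + position[1])
--         if 0 <= new_position[0] < len(grid) and 0 <= new_position[1] < len(grid[0]):
--             if grid[new_position[0]][new_position[1]] == '@':
--                 adjacent_rolls += 1
--             if adjacent_rolls >= 4:
--                 return False
--
--     return True
--
-- def find_accessible_rolls_positions(grid: list[list[str]]) -> list[tuple[int, int]]:
--     rolls_positions = find_rolls_positions(grid)
--     return [roll for roll in rolls_positions if check_if_accessible(grid, roll)]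
--
-- def count_rolls_removed(grid: list[list[str]]) -> int:
--     grid = [row.copy() for row in grid]
--     removed_rolls = 0
--
--     while accessible_rolls_positions := find_accessible_rolls_positions(grid):
--         for roll in accessible_rolls_positions:
--             removed_rolls += 1
--             grid[roll[0]][roll[1]] = '.'
--
--     return removed_rolls
-- ===== SOURCE B (Python) =====
-- ADJACENT_POSITIONS = [
--     (-1, -1),
--     (-1, 0),
--     (-1, 1),
--     (0, -1),
--     (0, 1),
--     (1, -1),
--     (1, 0),
--     (1, 1),
-- ]
--
-- def count_rolls_removed(grid):
--     # Kahn-style worklist peeling: compute each roll's neighbour count once,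
--     # then remove rolls with < 4 neighbours one at a time from a queue,
--     # decrementing neighbours' counts and enqueueing any that drop below 4.
--     rolls = []
--     for i, row in enumerate(grid):
--         for j, cell in enumerate(row):
--             if cell == '@':
--                 rolls.append((i, j))
--     roll_set = set(rolls)
--     deg = {}
--     for p in rolls:
--         deg[p] = sum((p[0] + di, p[1] + dj) in roll_set for di, dj in ADJACENT_POSITIONS)
--     queue = [p for p in rolls if deg[p] < 4]
--     scheduled = set(queue)
--     head = 0
--     while head < len(queue):
--         i, j = queue[head]
--         head += 1
--         for di, dj in ADJACENT_POSITIONS: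
--             q = (i + di, j + dj)
--             if q in roll_set and q not in scheduled:
--                 deg[q] -= 1
--                 if deg[q] < 4:
--                     scheduled.add(q)
--                     queue.append(q)
--     return len(queue)
-- ===== Notes on version B (the rewrite author's own statement) =====
-- stated objective: alternative
-- what changed: B replaces A's repeated whole-grid rescan rounds (recount every roll's neighbours, batch-remove, repeat until stable) with a Kahn-style worklist: neighbour counts are computed once, rolls with <4 neighbours go on a queue, and each dequeued removal decrements its neighbours' counts, enqueueing any that drop below 4; correct because eligibility is monotone under removals, so the surviving set is the unique maximal subset in which every roll has >=4 neighbours (a 4-core), independent of removal order.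
import Mathlib
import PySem

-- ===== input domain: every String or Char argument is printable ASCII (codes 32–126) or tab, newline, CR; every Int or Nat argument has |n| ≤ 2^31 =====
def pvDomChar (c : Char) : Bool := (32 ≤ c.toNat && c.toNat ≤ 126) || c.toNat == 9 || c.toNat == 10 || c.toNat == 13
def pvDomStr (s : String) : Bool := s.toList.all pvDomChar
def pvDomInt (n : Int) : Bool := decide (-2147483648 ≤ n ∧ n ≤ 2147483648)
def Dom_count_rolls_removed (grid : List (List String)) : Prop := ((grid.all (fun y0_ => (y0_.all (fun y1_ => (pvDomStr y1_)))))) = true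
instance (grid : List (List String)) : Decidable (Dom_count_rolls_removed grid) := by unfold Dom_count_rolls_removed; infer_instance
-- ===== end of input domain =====

-- B replaces A's repeated whole-grid rescan rounds with a Kahn-style worklist (neighbour
-- counts computed once, then decremented as rolls are removed); return values proved
-- equal on the stated Pre_.

-- ===== PORT A =====
def ADJACENT_POSITIONS : List (Int × Int) :=
  [(-1,-1),(-1,0),(-1,1),(0,-1),(0,1),(1,-1),(1,0),(1,1)]

def find_rolls_positions (grid : List (List String)) : List (Int × Int) :=
  (PySem.List.pyRange 0 (PySem.List.len grid) 1).foldl (fun acc i =>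
    (PySem.List.pyRange 0 (PySem.List.len (PySem.List.pyGetD grid i ([] : List String))) 1).foldl
      (fun acc2 j =>
        if PySem.List.pyGetD (PySem.List.pyGetD grid i ([] : List String)) j "" = "@" then
          acc2 ++ [(i, j)]
        else acc2) acc) []

-- the 'for position in ADJACENT_POSITIONS' loop with its early 'return False'
def check_go (grid : List (List String)) (roll : Int × Int) :
    List (Int × Int) → Int → Bool
  | [], _ => true
  | pos :: rest, cnt =>
    if 0 ≤ roll.1 + pos.1 ∧ roll.1 + pos.1 < PySem.List.len grid ∧
       0 ≤ roll.2 + pos.2 ∧ roll.2 + pos.2 < PySem.List.len (PySem.List.pyGetD grid 0 ([] : List String)) then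
      let cnt' :=
        if PySem.List.pyGetD (PySem.List.pyGetD grid (roll.1 + pos.1) ([] : List String)) (roll.2 + pos.2) "" = "@" then
          cnt + 1
        else cnt
      if 4 ≤ cnt' then false else check_go grid roll rest cnt'
    else check_go grid roll rest cnt

def check_if_accessible (grid : List (List String)) (roll : Int × Int) : Bool :=
  check_go grid roll ADJACENT_POSITIONS 0

def find_accessible_rolls_positions (grid : List (List String)) : List (Int × Int) :=
  (find_rolls_positions grid).filter (fun roll => check_if_accessible grid roll)

-- grid[roll[0]][roll[1]] = '.'
def rmCellA (g : List (List String)) (roll : Int × Int) : List (List String) :=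
  PySem.List.pySetD g roll.1
    (PySem.List.pySetD (PySem.List.pyGetD g roll.1 ([] : List String)) roll.2 ".")

-- termination measure for the while-loop: number of '@' cells
def countRollsA (g : List (List String)) : Nat :=
  (g.map (fun row => row.count "@")).sum

-- ——— lemmas cited by removeLoopA's decreasing_by (they must precede the definition) ———
lemma FR_canon (g : List (List String)) :
    find_rolls_positions g =
      (PySem.List.pyRange 0 (PySem.List.len g) 1).flatMap (fun i =>
        ((PySem.List.pyRange 0 (PySem.List.len (PySem.List.pyGetD g i ([] : List String))) 1).filter
          (fun j => decide (PySem.List.pyGetD (PySem.List.pyGetD g i ([] : List String)) j "" = "@"))).map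
          (fun j => (i, j))) := by
  unfold find_rolls_positions
  simp only [PySem.List.foldl_append_ite, PySem.List.foldl_append_eq_flatMap, List.nil_append]

lemma FR_nat (g : List (List String)) :
    find_rolls_positions g =
      (List.range g.length).flatMap (fun (a : Nat) =>
        ((List.range (g.getD a []).length).filter
          (fun (b : Nat) => decide ((g.getD a []).getD b "" = "@"))).map
          (fun (b : Nat) => ((a : Int), (b : Int)))) := by
  rw [FR_canon]
  simp only [PySem.List.len_eq, PySem.List.pyRange_zero_nat, List.flatMap_map,
    PySem.List.pyGetD_natCast, List.filter_map, List.map_map, Function.comp_def]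

lemma mem_find_rolls (g : List (List String)) (p : Int × Int) :
    p ∈ find_rolls_positions g ↔
      ∃ a b : Nat, a < g.length ∧ b < (g.getD a []).length ∧
        (g.getD a []).getD b "" = "@" ∧ p = ((a : Int), (b : Int)) := by
  rw [FR_nat]
  simp only [List.mem_flatMap, List.mem_map, List.mem_filter, List.mem_range,
    decide_eq_true_eq]
  constructor
  · rintro ⟨a, ha, b, ⟨hb, hc⟩, rfl⟩
    exact ⟨a, b, ha, hb, hc, rfl⟩
  · rintro ⟨a, b, ha, hb, hc, rfl⟩
    exact ⟨a, ha, b, ⟨hb, hc⟩, rfl⟩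

lemma count_set_dot_le (row : List String) (b : Nat) :
    (row.set b ".").count "@" ≤ row.count "@" := by
  induction row generalizing b with
  | nil => simp
  | cons x xs ih =>
    cases b with
    | zero => simp [List.count_cons]
    | succ n =>
      simp only [List.set_cons_succ, List.count_cons]
      have := ih n
      split <;> omega

lemma count_set_dot_lt (row : List String) (b : Nat) (hb : b < row.length)
    (h : row.getD b "" = "@") : (row.set b ".").count "@" < row.count "@" := by
  induction row generalizing b with
  | nil => simp at hb
  | cons x xs ih =>
    cases b with
    | zero =>
      simp only [List.getD_cons_zero] at h
      subst h
      simp [List.count_cons]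
    | succ n =>
      simp only [List.getD_cons_succ] at h
      simp only [List.length_cons, Nat.succ_lt_succ_iff] at hb
      simp only [List.set_cons_succ, List.count_cons]
      have := ih n hb h
      split <;> omega

lemma countA_set_le (g : List (List String)) (a : Nat) (r : List String)
    (h : r.count "@" ≤ (g.getD a []).count "@") :
    countRollsA (g.set a r) ≤ countRollsA g := by
  induction g generalizing a with
  | nil => simp [countRollsA]
  | cons y ys ih =>
    cases a with
    | zero =>
      simp only [List.getD_cons_zero] at h
      simp [countRollsA, List.set_cons_zero]
      omega
    | succ n =>
      simp only [List.getD_cons_succ] at h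
      simp only [List.set_cons_succ, countRollsA, List.map_cons, List.sum_cons] at *
      have := ih n h
      omega

lemma countA_set_lt (g : List (List String)) (a : Nat) (r : List String)
    (ha : a < g.length) (h : r.count "@" < (g.getD a []).count "@") :
    countRollsA (g.set a r) < countRollsA g := by
  induction g generalizing a with
  | nil => simp at ha
  | cons y ys ih =>
    cases a with
    | zero =>
      simp only [List.getD_cons_zero] at h
      simp [countRollsA, List.set_cons_zero]
      omega
    | succ n =>
      simp only [List.getD_cons_succ] at h
      simp only [List.length_cons, Nat.succ_lt_succ_iff] at ha
      simp only [List.set_cons_succ, countRollsA, List.map_cons, List.sum_cons] at *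
      have := ih n ha h
      omega

lemma rmCellA_natCast (g : List (List String)) (a b : Nat) :
    rmCellA g ((a : Int), (b : Int)) = g.set a ((g.getD a []).set b ".") := by
  unfold rmCellA
  simp

lemma countA_rmCellA_le (g : List (List String)) (a b : Nat) :
    countRollsA (rmCellA g ((a : Int), (b : Int))) ≤ countRollsA g := by
  rw [rmCellA_natCast]
  exact countA_set_le g a _ (count_set_dot_le _ b)

lemma countA_rmCellA_lt (g : List (List String)) (a b : Nat) (ha : a < g.length)
    (hb : b < (g.getD a []).length) (hc : (g.getD a []).getD b "" = "@") :
    countRollsA (rmCellA g ((a : Int), (b : Int))) < countRollsA g := by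
  rw [rmCellA_natCast]
  exact countA_set_lt g a _ ha (count_set_dot_lt _ b hb hc)

lemma countA_rmFold_le (g : List (List String)) (acc : List (Int × Int))
    (h : ∀ r ∈ acc, ∃ a b : Nat, r = ((a : Int), (b : Int))) :
    countRollsA (acc.foldl (fun s r => rmCellA s r) g) ≤ countRollsA g := by
  induction acc generalizing g with
  | nil => simp
  | cons r rest ih =>
    obtain ⟨a, b, rfl⟩ := h r (List.mem_cons_self)
    simp only [List.foldl_cons]
    exact le_trans (ih _ (fun q hq => h q (List.mem_cons_of_mem _ hq)))
      (countA_rmCellA_le g a b)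

lemma fold_pair_eq (g : List (List String)) (acc : List (Int × Int)) (z : Int) :
    acc.foldl (fun s roll => (rmCellA s.1 roll, s.2 + 1)) (g, z) =
      (acc.foldl (fun s r => rmCellA s r) g, z + acc.length) := by
  rw [PySem.List.foldl_prod_mk (f := fun s r => rmCellA s r) (g := fun c (_ : Int × Int) => c + 1)]
  rw [PySem.List.foldl_add (g := fun _ => (1 : Int))]
  simp

lemma countA_removal_lt (grid : List (List String)) (removed : Int)
    (h : ¬ find_accessible_rolls_positions grid = []) :
    countRollsA ((find_accessible_rolls_positions grid).foldl
      (fun s roll => (rmCellA s.1 roll, s.2 + 1)) (grid, removed)).1 < countRollsA grid := by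
  rw [fold_pair_eq]
  obtain ⟨p, rest, hacc⟩ := List.exists_cons_of_ne_nil h
  have hsub : ∀ q ∈ find_accessible_rolls_positions grid, q ∈ find_rolls_positions grid := by
    intro q hq
    exact (List.mem_filter.mp hq).1
  have hp : p ∈ find_rolls_positions grid := hsub p (hacc ▸ List.mem_cons_self)
  obtain ⟨a, b, ha, hb, hc, rfl⟩ := (mem_find_rolls grid p).mp hp
  rw [hacc]
  simp only [List.foldl_cons]
  refine lt_of_le_of_lt (countA_rmFold_le _ rest ?_) (countA_rmCellA_lt grid a b ha hb hc)
  intro q hq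
  have hqFR := hsub q (hacc ▸ List.mem_cons_of_mem _ hq)
  obtain ⟨a', b', _, _, _, rfl⟩ := (mem_find_rolls grid q).mp hqFR
  exact ⟨a', b', rfl⟩

-- the 'while accessible_rolls_positions := find_accessible_rolls_positions(grid):' loop
def removeLoopA (grid : List (List String)) (removed : Int) : Int :=
  if h : find_accessible_rolls_positions grid = [] then removed
  else
    let st := (find_accessible_rolls_positions grid).foldl
      (fun s roll => (rmCellA s.1 roll, s.2 + 1)) (grid, removed)
    removeLoopA st.1 st.2
termination_by countRollsA grid
decreasing_by exact countA_removal_lt grid removed h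

def count_rolls_removed (grid : List (List String)) : Int :=
  removeLoopA grid 0

-- ===== PORT B =====
def ADJ_B : List (Int × Int) :=
  [(-1,-1),(-1,0),(-1,1),(0,-1),(0,1),(1,-1),(1,0),(1,1)]

-- the double 'for i, row in enumerate(grid): for j, cell in enumerate(row): … append'
def rollsListB (grid : List (List String)) : List (Int × Int) :=
  (PySem.List.enumerate grid 0).foldl (fun acc irow =>
    (PySem.List.enumerate irow.2 0).foldl (fun acc2 jc =>
      if jc.2 = "@" then acc2 ++ [(irow.1, jc.1)] else acc2) acc) []

-- deg[p] = sum((p[0]+di, p[1]+dj) in roll_set for di, dj in ADJACENT_POSITIONS)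
def degSumB (rs : PySem.Set (Int × Int)) (p : Int × Int) : Int :=
  (ADJ_B.map (fun o =>
    if PySem.Set.contains rs (p.1 + o.1, p.2 + o.2) then (1 : Int) else 0)).sum

-- body of 'for di, dj in ADJACENT_POSITIONS: …' inside the while loop;
-- state = (deg, scheduled, pending part of the queue, len(queue))
def procNbr (rs : PySem.Set (Int × Int)) (p : Int × Int)
    (st : PySem.Dict (Int × Int) Int × PySem.Set (Int × Int) × List (Int × Int) × Int)
    (o : Int × Int) :
    PySem.Dict (Int × Int) Int × PySem.Set (Int × Int) × List (Int × Int) × Int :=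
  let q := (p.1 + o.1, p.2 + o.2)
  if PySem.Set.contains rs q && !(PySem.Set.contains st.2.1 q) then
    let d := PySem.Dict.getD st.1 q 0 - 1
    let deg' := PySem.Dict.insert st.1 q d
    if d < 4 then (deg', PySem.Set.add st.2.1 q, st.2.2.1 ++ [q], st.2.2.2 + 1)
    else (deg', st.2.1, st.2.2.1, st.2.2.2)
  else st

-- ——— lemmas cited by wlLoop's decreasing_by (they must precede the definition) ———
-- measure: |queue[head:]| + 2·|rolls not yet scheduled|
def wlM (rs sched pending : List (Int × Int)) : Nat :=
  pending.length + 2 * (rs.filter (fun x => !(PySem.Set.contains sched x))).length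

lemma procNbr_le (rs : PySem.Set (Int × Int)) (p : Int × Int)
    (st : PySem.Dict (Int × Int) Int × PySem.Set (Int × Int) × List (Int × Int) × Int)
    (o : Int × Int) :
    wlM rs (procNbr rs p st o).2.1 (procNbr rs p st o).2.2.1 ≤ wlM rs st.2.1 st.2.2.1 := by
  unfold procNbr
  by_cases h1 : (PySem.Set.contains rs (p.1 + o.1, p.2 + o.2)
      && !(PySem.Set.contains st.2.1 (p.1 + o.1, p.2 + o.2))) = true
  · simp only [if_pos h1]
    obtain ⟨hin, hns⟩ := Bool.and_eq_true_iff.mp h1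
    have hinm : (p.1 + o.1, p.2 + o.2) ∈ rs := (PySem.Set.contains_iff _ _).mp hin
    have hnsm : (p.1 + o.1, p.2 + o.2) ∉ st.2.1 := by
      intro hm
      rw [(PySem.Set.contains_iff _ _).mpr hm] at hns
      simp at hns
    by_cases h2 : PySem.Dict.getD st.1 (p.1 + o.1, p.2 + o.2) 0 - 1 < 4
    · simp only [if_pos h2]
      unfold wlM
      simp only [List.length_append, List.length_cons, List.length_nil]
      have hfe : rs.filter (fun x => !(PySem.Set.contains (PySem.Set.add st.2.1 (p.1 + o.1, p.2 + o.2)) x)) =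
          (rs.filter (fun x => !(PySem.Set.contains st.2.1 x))).filter
            (fun x => !(x == (p.1 + o.1, p.2 + o.2))) := by
        rw [List.filter_filter]
        refine List.filter_congr ?_
        intro x _
        have : (PySem.Set.contains (PySem.Set.add st.2.1 (p.1 + o.1, p.2 + o.2)) x) =
            (PySem.Set.contains st.2.1 x || x == (p.1 + o.1, p.2 + o.2)) := by
          by_cases hx : x ∈ PySem.Set.add st.2.1 (p.1 + o.1, p.2 + o.2)
          · rw [(PySem.Set.contains_iff _ _).mpr hx]
            rcases (PySem.Set.mem_add _ _ _).mp hx with h | h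
            · rw [(PySem.Set.contains_iff _ _).mpr h]; simp
            · subst h; simp
          · have h1' : PySem.Set.contains (PySem.Set.add st.2.1 (p.1 + o.1, p.2 + o.2)) x = false := by
              rw [← Bool.not_eq_true]; intro hc; exact hx ((PySem.Set.contains_iff _ _).mp hc)
            have h2' : PySem.Set.contains st.2.1 x = false := by
              rw [← Bool.not_eq_true]; intro hc
              exact hx ((PySem.Set.mem_add _ _ _).mpr (Or.inl ((PySem.Set.contains_iff _ _).mp hc)))
            have h3' : (x == (p.1 + o.1, p.2 + o.2)) = false := by
              rw [beq_eq_false_iff_ne]; intro hc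
              exact hx ((PySem.Set.mem_add _ _ _).mpr (Or.inr hc))
            rw [h1', h2', h3']; rfl
        rw [this]
        simp [Bool.not_or, Bool.and_comm]
      rw [hfe]
      have hlt : ((rs.filter (fun x => !(PySem.Set.contains st.2.1 x))).filter
          (fun x => !(x == (p.1 + o.1, p.2 + o.2)))).length <
          (rs.filter (fun x => !(PySem.Set.contains st.2.1 x))).length := by
        refine List.length_filter_lt_length_iff_exists.mpr ⟨(p.1 + o.1, p.2 + o.2), ?_, by simp⟩
        exact List.mem_filter.mpr ⟨hinm, hns⟩
      omega
    · simp only [if_neg h2]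
      exact le_rfl
  · simp only [if_neg h1]
    exact le_rfl

lemma wl_foldl_le (rs : PySem.Set (Int × Int)) (p : Int × Int) :
    ∀ (l : List (Int × Int))
      (st : PySem.Dict (Int × Int) Int × PySem.Set (Int × Int) × List (Int × Int) × Int),
      wlM rs (l.foldl (procNbr rs p) st).2.1 (l.foldl (procNbr rs p) st).2.2.1 ≤
        wlM rs st.2.1 st.2.2.1
  | [], st => le_rfl
  | o :: rest, st => by
    simp only [List.foldl_cons]
    exact le_trans (wl_foldl_le rs p rest (procNbr rs p st o)) (procNbr_le rs p st o)

-- the 'while head < len(queue):' loop; pending = queue[head:], count = len(queue)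
def wlLoop (rs : PySem.Set (Int × Int)) :
    PySem.Dict (Int × Int) Int → PySem.Set (Int × Int) → List (Int × Int) → Int → Int
  | _, _, [], count => count
  | deg, sched, p :: rest, count =>
    let st := ADJ_B.foldl (procNbr rs p) (deg, sched, rest, count)
    wlLoop rs st.1 st.2.1 st.2.2.1 st.2.2.2
termination_by _ sched pending _ => wlM rs sched pending
decreasing_by
  calc wlM rs (ADJ_B.foldl (procNbr rs p) (deg, sched, rest, count)).2.1
        (ADJ_B.foldl (procNbr rs p) (deg, sched, rest, count)).2.2.1
      ≤ wlM rs sched rest := wl_foldl_le rs p ADJ_B (deg, sched, rest, count)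
    _ < wlM rs sched (p :: rest) := by unfold wlM; simp only [List.length_cons]; omega

def count_rolls_removed_alt (grid : List (List String)) : Int :=
  let rolls := rollsListB grid
  let rs : PySem.Set (Int × Int) := PySem.Set.ofList rolls
  let deg := rolls.foldl (fun d p => PySem.Dict.insert d p (degSumB rs p)) PySem.Dict.empty
  let queue := rolls.filter (fun p => PySem.Dict.getD deg p 0 < 4)
  let sched : PySem.Set (Int × Int) := PySem.Set.ofList queue
  wlLoop rs deg sched queue (queue.length : Int)

-- ===== PRECONDITION & SPEC =====
-- Pre_ restricts to the natural domain, rectangular grids: on malformed (non-rectangular)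
-- grids containing a roll '@', A either raises IndexError or clips every neighbour check to
-- row 0's width, an accident of its bounds test; ragged grids without any '@' are kept
-- (A returns 0 on them without indexing).
def Pre_count_rolls_removed (grid : List (List String)) : Prop :=
  (∀ a : Nat, a < grid.length → (grid.getD a []).length = (grid.getD 0 []).length) ∨
  (∀ row ∈ grid, ¬ ("@" ∈ row))
instance (grid : List (List String)) : Decidable (Pre_count_rolls_removed grid) := by
  unfold Pre_count_rolls_removed; infer_instance

def pvWitness_count_rolls_removed : List (List String) := [["@", "."], [".", "@"]]

def Spec_count_rolls_removed (grid : List (List String)) (out : Int) : Prop :=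
  out = count_rolls_removed_alt grid
instance (grid : List (List String)) (out : Int) : Decidable (Spec_count_rolls_removed grid out) := by
  unfold Spec_count_rolls_removed; infer_instance

-- ===== CLAIM (what is proved, stated in full; the proofs are below) =====
def Claim_equal_count_rolls_removed : Prop :=
  ∀ (grid : List (List String)), Dom_count_rolls_removed grid →
    Pre_count_rolls_removed grid →
    Spec_count_rolls_removed grid (count_rolls_removed grid)

-- ===== LEMMAS AND PROOFS =====

-- abstract neighbour count and closedness (the 4-core)
def nbN (S : List (Int × Int)) (q : Int × Int) : Nat :=
  ADJ_B.countP (fun o => decide ((q.1 + o.1, q.2 + o.2) ∈ S))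

def ClosedS (S : List (Int × Int)) : Prop := ∀ p ∈ S, 4 ≤ nbN S p

lemma nbN_mono (S T : List (Int × Int)) (h : ∀ x ∈ S, x ∈ T) (q : Int × Int) :
    nbN S q ≤ nbN T q := by
  refine List.countP_mono_left ?_
  intro o _ ho
  exact decide_eq_true (h _ (of_decide_eq_true ho))


lemma contains_decide {x : Int × Int} (s : List (Int × Int)) :
    PySem.Set.contains s x = decide (x ∈ s) := by
  by_cases h : x ∈ s
  · rw [(PySem.Set.contains_iff _ _).mpr h]; simp [h]
  · have : PySem.Set.contains s x = false := by
      rw [← Bool.not_eq_true]; intro hc; exact h ((PySem.Set.contains_iff _ _).mp hc)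
    rw [this]; simp [h]

-- ——— A's round-based loop re-expressed as abstract batch peeling on the roll list ———
def peelP (r : List (Int × Int)) (p : Int × Int) : Bool := decide (nbN r p < 4)

def peelLoop (r : List (Int × Int)) (rem : Int) : Int :=
  if h : r.filter (peelP r) = [] then rem
  else peelLoop (r.filter (fun x => !peelP r x)) (rem + ((r.filter (peelP r)).length : Int))
termination_by r.length
decreasing_by
  obtain ⟨q, rest, hq⟩ := List.exists_cons_of_ne_nil h
  have hqm : q ∈ r.filter (peelP r) := hq ▸ List.mem_cons_self
  obtain ⟨hqr, hqp⟩ := List.mem_filter.mp hqm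
  have hgoal : (r.filter (fun x => !peelP r x)).length < r.length := by
    refine List.length_filter_lt_length_iff_exists.mpr ⟨q, hqr, ?_⟩
    simp [hqp]
  have hre : (List.filter (fun (x : {x // x ∈ r}) => !peelP r ↑x) r.attach).unattach.length =
      (r.filter (fun x => !peelP r x)).length := by
    simp only [List.length_unattach, ← List.countP_eq_length_filter]
    exact List.countP_attach (l := r) (p := fun x => !peelP r x)
  rw [hre]
  exact hgoal

lemma nodup_FR (g : List (List String)) : (find_rolls_positions g).Nodup := by
  rw [FR_nat, List.nodup_flatMap]
  refine ⟨?_, ?_⟩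
  · intro a _
    refine List.Nodup.map ?_ (List.Nodup.filter _ List.nodup_range)
    intro x y hxy
    have := congrArg Prod.snd hxy
    simpa using this
  · refine List.Pairwise.imp ?_ List.pairwise_lt_range
    intro a b hab
    intro x hx hx2
    obtain ⟨xa, -, rfl⟩ := List.mem_map.mp hx
    obtain ⟨xb, -, heq⟩ := List.mem_map.mp hx2
    have h1 : (b : Int) = (a : Int) := congrArg Prod.fst heq
    have h2 : b = a := by exact_mod_cast h1
    omega

-- rectangularity of the evolving grid
def RectG (g : List (List String)) : Prop :=
  ∀ a : Nat, a < g.length → (g.getD a []).length = (g.getD 0 []).length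

-- per-offset weight counted by A's accessibility loop
def adjW (g : List (List String)) (p o : Int × Int) : Int :=
  if (0 ≤ p.1 + o.1 ∧ p.1 + o.1 < PySem.List.len g ∧
      0 ≤ p.2 + o.2 ∧ p.2 + o.2 < PySem.List.len (PySem.List.pyGetD g 0 ([] : List String))) ∧
     PySem.List.pyGetD (PySem.List.pyGetD g (p.1 + o.1) ([] : List String)) (p.2 + o.2) "" = "@"
  then 1 else 0

lemma adjW_nonneg (g : List (List String)) (p : Int × Int) (offs : List (Int × Int)) :
    0 ≤ (offs.map (adjW g p)).sum := by
  refine List.sum_nonneg ?_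
  intro x hx
  obtain ⟨o, _, rfl⟩ := List.mem_map.mp hx
  unfold adjW
  split <;> norm_num

lemma check_go_eq (g : List (List String)) (p : Int × Int) :
    ∀ (offs : List (Int × Int)) (cnt : Int), cnt < 4 →
      check_go g p offs cnt = decide (cnt + (offs.map (adjW g p)).sum < 4)
  | [], cnt, h => by
    simp [check_go, h]
  | o :: rest, cnt, h => by
    simp only [check_go]
    by_cases hb : (0 ≤ p.1 + o.1 ∧ p.1 + o.1 < PySem.List.len g ∧
        0 ≤ p.2 + o.2 ∧ p.2 + o.2 < PySem.List.len (PySem.List.pyGetD g 0 ([] : List String)))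
    · simp only [if_pos hb]
      by_cases hc : PySem.List.pyGetD (PySem.List.pyGetD g (p.1 + o.1) ([] : List String)) (p.2 + o.2) "" = "@"
      · simp only [if_pos hc]
        have hW : adjW g p o = 1 := if_pos ⟨hb, hc⟩
        by_cases h4 : (4 : Int) ≤ cnt + 1
        · simp only [if_pos h4]
          have h0 := adjW_nonneg g p rest
          simp only [List.map_cons, List.sum_cons, hW]
          rw [eq_comm, decide_eq_false_iff_not]
          omega
        · simp only [if_neg h4]
          rw [check_go_eq g p rest (cnt + 1) (by omega)]
          simp only [List.map_cons, List.sum_cons, hW]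
          rw [add_assoc]
      · simp only [if_neg hc]
        have hW : adjW g p o = 0 := if_neg (fun hh => hc hh.2)
        have h4 : ¬ (4 : Int) ≤ cnt := by omega
        simp only [if_neg h4]
        rw [check_go_eq g p rest cnt h]
        simp only [List.map_cons, List.sum_cons, hW, zero_add]
    · simp only [if_neg hb]
      have hW : adjW g p o = 0 := if_neg (fun hh => hb hh.1)
      rw [check_go_eq g p rest cnt h]
      simp only [List.map_cons, List.sum_cons, hW, zero_add]

lemma adjW_eq_mem (g : List (List String)) (hr : RectG g) (p o : Int × Int) :
    adjW g p o = if (p.1 + o.1, p.2 + o.2) ∈ find_rolls_positions g then 1 else 0 := by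
  unfold adjW
  by_cases hm : (p.1 + o.1, p.2 + o.2) ∈ find_rolls_positions g
  · rw [if_pos hm, if_pos]
    obtain ⟨a, b, ha, hb, hc, heq⟩ := (mem_find_rolls g _).mp hm
    have h1 : p.1 + o.1 = (a : Int) := congrArg Prod.fst heq
    have h2 : p.2 + o.2 = (b : Int) := congrArg Prod.snd heq
    rw [h1, h2]
    refine ⟨⟨by positivity, ?_, by positivity, ?_⟩, ?_⟩
    · simp only [PySem.List.len_eq]
      exact_mod_cast ha
    · simp only [PySem.List.len_eq, PySem.List.pyGetD_zero]
      have := hr a ha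
      exact_mod_cast this ▸ hb
    · simp only [PySem.List.pyGetD_natCast]
      exact hc
  · rw [if_neg hm, if_neg]
    rintro ⟨⟨hb1, hb2, hb3, hb4⟩, hcell⟩
    apply hm
    rw [mem_find_rolls]
    have ha : (p.1 + o.1).toNat < g.length := by
      simp only [PySem.List.len_eq] at hb2
      omega
    have hblen : (p.2 + o.2).toNat < (g.getD (p.1 + o.1).toNat []).length := by
      simp only [PySem.List.len_eq, PySem.List.pyGetD_zero] at hb4
      rw [hr _ ha]
      omega
    refine ⟨(p.1 + o.1).toNat, (p.2 + o.2).toNat, ha, hblen, ?_, ?_⟩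
    · have e1 : ((p.1 + o.1).toNat : Int) = p.1 + o.1 := Int.toNat_of_nonneg hb1
      have e2 : ((p.2 + o.2).toNat : Int) = p.2 + o.2 := Int.toNat_of_nonneg hb3
      rw [← e1, ← e2, PySem.List.pyGetD_natCast, PySem.List.pyGetD_natCast] at hcell
      exact hcell
    · simp [Int.toNat_of_nonneg hb1, Int.toNat_of_nonneg hb3]

lemma check_eq_nb (g : List (List String)) (hr : RectG g) (p : Int × Int) :
    check_if_accessible g p = peelP (find_rolls_positions g) p := by
  unfold check_if_accessible
  rw [check_go_eq g p ADJACENT_POSITIONS 0 (by norm_num), zero_add]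
  have h2 : ADJACENT_POSITIONS.map (adjW g p) =
      ADJACENT_POSITIONS.map (fun o =>
        if ((p.1 + o.1, p.2 + o.2) ∈ find_rolls_positions g) then (1 : Int) else 0) :=
    List.map_congr_left (fun o _ => adjW_eq_mem g hr p o)
  rw [h2]
  have h3 : (ADJACENT_POSITIONS.map (fun o =>
      if ((p.1 + o.1, p.2 + o.2) ∈ find_rolls_positions g) then (1 : Int) else 0)).sum =
      ((ADJACENT_POSITIONS.countP
        (fun o => decide ((p.1 + o.1, p.2 + o.2) ∈ find_rolls_positions g)) : Nat) : Int) := by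
    rw [← PySem.List.sum_map_ite_one_zero
      (fun o => decide ((p.1 + o.1, p.2 + o.2) ∈ find_rolls_positions g)) ADJACENT_POSITIONS]
    refine congrArg List.sum (List.map_congr_left ?_)
    intro o _
    by_cases hm : (p.1 + o.1, p.2 + o.2) ∈ find_rolls_positions g <;> simp [hm]
  rw [h3]
  unfold peelP nbN
  have hAB : ADJ_B = ADJACENT_POSITIONS := rfl
  rw [hAB, decide_eq_decide]
  constructor <;> intro h <;> exact_mod_cast h

lemma filter_acc_eq (g : List (List String)) (hr : RectG g) :
    find_accessible_rolls_positions g =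
      (find_rolls_positions g).filter (peelP (find_rolls_positions g)) := by
  unfold find_accessible_rolls_positions
  exact List.filter_congr (fun p _ => check_eq_nb g hr p)

-- cell access after a single removal
lemma getD_set_outer (l : List (List String)) (n : Nat) (v : List String) (m : Nat) :
    (l.set n v).getD m [] = if n = m ∧ n < l.length then v else l.getD m [] := by
  simp only [List.getD_eq_getElem?_getD, List.getElem?_set]
  split_ifs <;> simp_all <;> omega

lemma getD_set_inner (l : List String) (n : Nat) (v : String) (m : Nat) :
    (l.set n v).getD m "" = if n = m ∧ n < l.length then v else l.getD m "" := by
  simp only [List.getD_eq_getElem?_getD, List.getElem?_set]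
  split_ifs <;> simp_all <;> omega

lemma length_rmCellA (g : List (List String)) (a b : Nat) :
    (rmCellA g ((a : Int), (b : Int))).length = g.length := by
  rw [rmCellA_natCast]
  simp

lemma rowlen_rmCellA (g : List (List String)) (a b : Nat) (i : Nat) :
    ((rmCellA g ((a : Int), (b : Int))).getD i []).length = (g.getD i []).length := by
  rw [rmCellA_natCast, getD_set_outer]
  by_cases h : a = i ∧ a < g.length
  · rw [if_pos h, List.length_set, h.1]
  · rw [if_neg h]

lemma cell_rmCellA (g : List (List String)) (a b i j : Nat)
    (hi : i < g.length) (hj : j < (g.getD i []).length) :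
    ((rmCellA g ((a : Int), (b : Int))).getD i []).getD j "" =
      if a = i ∧ b = j then "." else (g.getD i []).getD j "" := by
  rw [rmCellA_natCast, getD_set_outer]
  by_cases hai : a = i
  · subst hai
    rw [if_pos ⟨rfl, hi⟩, getD_set_inner]
    by_cases hbj : b = j
    · subst hbj
      rw [if_pos ⟨rfl, hj⟩, if_pos ⟨rfl, rfl⟩]
    · rw [if_neg (fun hh => hbj hh.1), if_neg (fun hh => hbj hh.2)]
  · rw [if_neg (fun hh => hai hh.1), if_neg (fun hh => hai hh.1)]

lemma length_rmFold (g : List (List String)) (acc : List (Int × Int))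
    (h : ∀ r ∈ acc, ∃ a b : Nat, r = ((a : Int), (b : Int))) :
    (acc.foldl (fun s r => rmCellA s r) g).length = g.length := by
  induction acc generalizing g with
  | nil => rfl
  | cons r rest ih =>
    obtain ⟨a, b, rfl⟩ := h r (List.mem_cons_self)
    simp only [List.foldl_cons]
    rw [ih _ (fun q hq => h q (List.mem_cons_of_mem _ hq)), length_rmCellA]

lemma rowlen_rmFold (g : List (List String)) (acc : List (Int × Int))
    (h : ∀ r ∈ acc, ∃ a b : Nat, r = ((a : Int), (b : Int))) (i : Nat) :
    ((acc.foldl (fun s r => rmCellA s r) g).getD i []).length = (g.getD i []).length := by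
  induction acc generalizing g with
  | nil => rfl
  | cons r rest ih =>
    obtain ⟨a, b, rfl⟩ := h r (List.mem_cons_self)
    simp only [List.foldl_cons]
    rw [ih _ (fun q hq => h q (List.mem_cons_of_mem _ hq)), rowlen_rmCellA]

lemma cell_rmFold (g : List (List String)) (acc : List (Int × Int))
    (h : ∀ r ∈ acc, ∃ a b : Nat, r = ((a : Int), (b : Int))) (i j : Nat)
    (hi : i < g.length) (hj : j < (g.getD i []).length) :
    ((acc.foldl (fun s r => rmCellA s r) g).getD i []).getD j "" =
      if ((i : Int), (j : Int)) ∈ acc then "." else (g.getD i []).getD j "" := by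
  induction acc generalizing g with
  | nil => simp
  | cons r rest ih =>
    obtain ⟨a, b, rfl⟩ := h r (List.mem_cons_self)
    simp only [List.foldl_cons]
    rw [ih _ (fun q hq => h q (List.mem_cons_of_mem _ hq)) (by rwa [length_rmCellA])
      (by rwa [rowlen_rmCellA]), cell_rmCellA g a b i j hi hj]
    by_cases hmem : ((i : Int), (j : Int)) ∈ rest
    · simp [hmem]
    · by_cases heq : a = i ∧ b = j
      · obtain ⟨rfl, rfl⟩ := heq
        simp [List.mem_cons]
      · have hne : ((i : Int), (j : Int)) ∉ ((a : Int), (b : Int)) :: rest := by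
          intro hmem2
          rcases List.mem_cons.mp hmem2 with hh | hh
          · apply heq
            have h1 : (a : Int) = (i : Int) := (congrArg Prod.fst hh).symm
            have h2 : (b : Int) = (j : Int) := (congrArg Prod.snd hh).symm
            exact ⟨by exact_mod_cast h1, by exact_mod_cast h2⟩
          · exact hmem hh
        simp [hmem, hne, heq]

lemma FR_rmFold (g : List (List String)) (acc : List (Int × Int))
    (h : ∀ r ∈ acc, ∃ a b : Nat, r = ((a : Int), (b : Int))) :
    find_rolls_positions (acc.foldl (fun s r => rmCellA s r) g) =
      (find_rolls_positions g).filter (fun p => !(PySem.Set.contains acc p)) := by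
  rw [FR_nat, FR_nat, length_rmFold g acc h, List.filter_flatMap]
  refine List.flatMap_congr ?_
  intro a ha
  have ha' : a < g.length := List.mem_range.mp ha
  rw [rowlen_rmFold g acc h a, List.filter_map, List.filter_filter]
  congr 1
  refine List.filter_congr ?_
  intro b hb
  have hb' : b < (g.getD a []).length := List.mem_range.mp hb
  rw [cell_rmFold g acc h a b ha' hb']
  by_cases hmem : ((a : Int), (b : Int)) ∈ acc
  · rw [if_pos hmem]
    have hcon : PySem.Set.contains acc ((a : Int), (b : Int)) = true :=
      (PySem.Set.contains_iff _ _).mpr hmem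
    simp [hcon]
    intro hno
    exact absurd hmem hno
  · rw [if_neg hmem]
    have hcon : PySem.Set.contains acc ((a : Int), (b : Int)) = false := by
      rw [← Bool.not_eq_true]
      intro hc
      exact hmem ((PySem.Set.contains_iff _ _).mp hc)
    simp [hcon]
    intro _
    exact hmem

lemma rect_rmFold (g : List (List String)) (acc : List (Int × Int))
    (h : ∀ r ∈ acc, ∃ a b : Nat, r = ((a : Int), (b : Int))) (hr : RectG g) :
    RectG (acc.foldl (fun s r => rmCellA s r) g) := by
  intro a ha
  rw [rowlen_rmFold g acc h, rowlen_rmFold g acc h]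
  exact hr a (by rwa [length_rmFold g acc h] at ha)

-- A's while-loop equals batch peeling on the roll list
lemma loopA_peel (n : Nat) : ∀ (g : List (List String)) (rem : Int),
    (find_rolls_positions g).length ≤ n → RectG g →
    removeLoopA g rem = peelLoop (find_rolls_positions g) rem := by
  induction n with
  | zero =>
    intro g rem hlen _
    have hFR : find_rolls_positions g = [] := List.eq_nil_of_length_eq_zero (Nat.le_zero.mp hlen)
    rw [removeLoopA, peelLoop.eq_def]
    have hacc : find_accessible_rolls_positions g = [] := by
      unfold find_accessible_rolls_positions
      rw [hFR]
      rfl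
    rw [dif_pos hacc, dif_pos (by rw [hFR]; rfl)]
  | succ n ih =>
    intro g rem hlen hrect
    have hacc := filter_acc_eq g hrect
    rw [removeLoopA, peelLoop.eq_def]
    by_cases hE : find_accessible_rolls_positions g = []
    · rw [dif_pos hE, dif_pos (by rw [← hacc]; exact hE)]
    · rw [dif_neg hE, dif_neg (by rw [← hacc]; exact hE)]
      simp only [fold_pair_eq]
      have hshape : ∀ r ∈ find_accessible_rolls_positions g,
          ∃ a b : Nat, r = ((a : Int), (b : Int)) := by
        intro r hrm
        obtain ⟨a, b, _, _, _, rfl⟩ :=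
          (mem_find_rolls g r).mp (List.mem_filter.mp hrm).1
        exact ⟨a, b, rfl⟩
      have hFR' := FR_rmFold g (find_accessible_rolls_positions g) hshape
      have hdiff : find_rolls_positions ((find_accessible_rolls_positions g).foldl
          (fun s r => rmCellA s r) g) =
          (find_rolls_positions g).filter (fun x => !peelP (find_rolls_positions g) x) := by
        rw [hFR']
        refine List.filter_congr ?_
        intro p hp
        have : PySem.Set.contains (find_accessible_rolls_positions g) p =
            peelP (find_rolls_positions g) p := by
          rw [contains_decide, hacc]
          by_cases hpp : peelP (find_rolls_positions g) p = true
          · rw [hpp]; simp [List.mem_filter.mpr ⟨hp, hpp⟩]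
          · rw [Bool.not_eq_true] at hpp
            rw [hpp, decide_eq_false_iff_not]
            intro hc
            rw [(List.mem_filter.mp hc).2] at hpp
            simp at hpp
        rw [this]
      have hlen' : (find_rolls_positions ((find_accessible_rolls_positions g).foldl
          (fun s r => rmCellA s r) g)).length ≤ n := by
        rw [hdiff]
        have hlt : ((find_rolls_positions g).filter
            (fun x => !peelP (find_rolls_positions g) x)).length <
            (find_rolls_positions g).length := by
          obtain ⟨p, rest, hcons⟩ := List.exists_cons_of_ne_nil hE
          have hpacc : p ∈ find_accessible_rolls_positions g := hcons ▸ List.mem_cons_self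
          rw [hacc] at hpacc
          obtain ⟨hpFR, hpp⟩ := List.mem_filter.mp hpacc
          exact List.length_filter_lt_length_iff_exists.mpr ⟨p, hpFR, by simp [hpp]⟩
        omega
      have hrect' := rect_rmFold g (find_accessible_rolls_positions g) hshape hrect
      rw [ih _ _ hlen' hrect', hdiff]
      congr 1
      rw [hacc]

lemma FR_nil_of_noRoll (g : List (List String)) (h : ∀ row ∈ g, ¬ ("@" ∈ row)) :
    find_rolls_positions g = [] := by
  rcases hFR : find_rolls_positions g with _ | ⟨p, rest⟩
  · rfl
  · exfalso
    have hp : p ∈ find_rolls_positions g := by rw [hFR]; exact List.mem_cons_self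
    obtain ⟨a, b, ha, hb, hc, rfl⟩ := (mem_find_rolls g p).mp hp
    have hrow : g.getD a [] ∈ g := by
      rw [List.getD_eq_getElem _ _ ha]
      exact List.getElem_mem ha
    refine h _ hrow ?_
    rw [← hc, List.getD_eq_getElem _ _ hb]
    exact List.getElem_mem hb

-- ——— the batch peel computes |r| minus the size of the unique maximal closed subset ———
lemma peelLoop_core : ∀ (n : Nat) (r : List (Int × Int)) (rem : Int),
    r.length ≤ n → r.Nodup →
    ∃ F : List (Int × Int),
      peelLoop r rem = rem + ((r.length : Int) - (F.length : Int)) ∧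
      (∀ x ∈ F, x ∈ r) ∧ F.Nodup ∧ ClosedS F ∧
      (∀ S, (∀ x ∈ S, x ∈ r) → ClosedS S → ∀ x ∈ S, x ∈ F) := by
  intro n
  induction n with
  | zero =>
    intro r rem hlen _
    have : r = [] := List.eq_nil_of_length_eq_zero (Nat.le_zero.mp hlen)
    subst this
    refine ⟨[], ?_, by simp, List.nodup_nil, fun p hp => absurd hp (List.not_mem_nil), ?_⟩
    · rw [peelLoop.eq_def]; simp
    · intro S hS _ x hx
      exact absurd (hS x hx) List.not_mem_nil
  | succ n ih =>
    intro r rem hlen hnd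
    by_cases hE : r.filter (peelP r) = []
    · refine ⟨r, ?_, fun x hx => hx, hnd, ?_, fun S hS _ x hx => hS x hx⟩
      · rw [peelLoop.eq_def, dif_pos hE]; ring
      · intro p hp
        by_contra hlt
        have hpp : peelP r p = true := decide_eq_true (by unfold nbN at hlt ⊢; omega)
        have : p ∈ r.filter (peelP r) := List.mem_filter.mpr ⟨hp, hpp⟩
        rw [hE] at this
        exact absurd this List.not_mem_nil
    · rw [peelLoop.eq_def, dif_neg hE]
      obtain ⟨q, qrest, hq⟩ := List.exists_cons_of_ne_nil hE
      have hqm := hq ▸ List.mem_cons_self (a := q) (l := qrest)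
      obtain ⟨hqr, hqp⟩ := List.mem_filter.mp hqm
      have hlt : (r.filter (fun x => !peelP r x)).length < r.length :=
        List.length_filter_lt_length_iff_exists.mpr ⟨q, hqr, by simp [hqp]⟩
      obtain ⟨F, hF1, hF2, hF3, hF4, hF5⟩ :=
        ih (r.filter (fun x => !peelP r x)) (rem + ((r.filter (peelP r)).length : Int))
          (by omega) (hnd.filter _)
      have hsplit := (List.length_eq_length_filter_add (l := r) (peelP r)).symm
      refine ⟨F, ?_, fun x hx => (List.mem_filter.mp (hF2 x hx)).1, hF3, hF4, ?_⟩
      · rw [hF1]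
        push_cast
        rw [← hsplit]
        push_cast
        ring
      · intro S hS hSc x hx
        refine hF5 S ?_ hSc x hx
        intro y hy
        refine List.mem_filter.mpr ⟨hS y hy, ?_⟩
        have h4 : 4 ≤ nbN S y := hSc y hy
        have hmono := nbN_mono S r hS y
        simp only [peelP, Bool.not_eq_eq_eq_not, Bool.not_true, decide_eq_false_iff_not]
        omega

-- uniqueness of the maximal closed subset (only its size is needed)
lemma core_length_eq (r F1 F2 : List (Int × Int))
    (h1sub : ∀ x ∈ F1, x ∈ r) (h1nd : F1.Nodup) (h1c : ClosedS F1)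
    (h1max : ∀ S, (∀ x ∈ S, x ∈ r) → ClosedS S → ∀ x ∈ S, x ∈ F1)
    (h2sub : ∀ x ∈ F2, x ∈ r) (h2nd : F2.Nodup) (h2c : ClosedS F2)
    (h2max : ∀ S, (∀ x ∈ S, x ∈ r) → ClosedS S → ∀ x ∈ S, x ∈ F2) :
    F1.length = F2.length := by
  have hperm : List.Perm F1 F2 :=
    (List.perm_ext_iff_of_nodup h1nd h2nd).mpr
      (fun x => ⟨fun hx => h2max F1 h1sub h1c x hx, fun hx => h1max F2 h2sub h2c x hx⟩)
  exact hperm.length_eq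


-- ——— counting helpers for the 8-neighbourhood ———
lemma countP_split (l : List (Int × Int)) (p q : (Int × Int) → Bool) :
    l.countP p = l.countP (fun x => p x && q x) + l.countP (fun x => p x && !q x) := by
  induction l with
  | nil => simp
  | cons x xs ih =>
    simp only [List.countP_cons, ih]
    by_cases h1 : p x = true <;> by_cases h2 : q x = true <;> simp [h1, h2] <;> omega

lemma countP_single (l : List (Int × Int)) (hl : l.Nodup) (c : Int × Int)
    (D : (Int × Int) → Bool) :
    l.countP (fun o => decide (o = c) && D o) = if c ∈ l ∧ D c = true then 1 else 0 := by
  induction l with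
  | nil => simp
  | cons x xs ih =>
    obtain ⟨hx, hxs⟩ := List.nodup_cons.mp hl
    rw [List.countP_cons, ih hxs]
    by_cases hxc : x = c
    · subst hxc
      have hnotin : ¬ (x ∈ xs) := hx
      by_cases hD : D x = true <;> simp [hD, hnotin]
    · have hb : (decide (x = c) && D x) = false := by simp [hxc]
      rw [hb]
      have hcx : (c = x) = False := by
        simp only [eq_iff_iff, iff_false]
        exact fun h => hxc h.symm
      simp [List.mem_cons, hcx]

def liveL (rs popped : List (Int × Int)) : List (Int × Int) :=
  rs.filter (fun x => !decide (x ∈ popped))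

def offAdj (done : List (Int × Int)) (p q : Int × Int) : Nat :=
  done.countP (fun o => decide ((p.1 + o.1, p.2 + o.2) = q))

lemma ADJ_neg_mem (o : Int × Int) (h : o ∈ ADJ_B) : (-o.1, -o.2) ∈ ADJ_B := by
  fin_cases h <;> decide

lemma offAdj_ADJ (p q : Int × Int) :
    offAdj ADJ_B p q = if (q.1 - p.1, q.2 - p.2) ∈ ADJ_B then 1 else 0 := by
  unfold offAdj
  have h1 : ∀ o ∈ ADJ_B, (decide ((p.1 + o.1, p.2 + o.2) = q)) = true ↔
      (decide (o = (q.1 - p.1, q.2 - p.2)) && (fun _ : Int × Int => true) o) = true := by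
    intro o _
    simp only [Bool.and_true, decide_eq_true_eq, Prod.ext_iff]
    omega
  rw [List.countP_congr h1, countP_single ADJ_B (by decide) _ (fun _ => true)]
  simp

lemma live_append (rs popped : List (Int × Int)) (p : Int × Int) :
    liveL rs (popped ++ [p]) = (liveL rs popped).filter (fun x => !decide (x = p)) := by
  unfold liveL
  rw [List.filter_filter]
  refine List.filter_congr ?_
  intro x _
  by_cases h1 : x ∈ popped <;> by_cases h2 : x = p <;> simp [h1, h2]

lemma mem_liveL (rs popped : List (Int × Int)) (x : Int × Int) :
    x ∈ liveL rs popped ↔ x ∈ rs ∧ x ∉ popped := by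
  unfold liveL
  simp

lemma nbN_live_pop (rs popped : List (Int × Int)) (p q : Int × Int)
    (hp1 : p ∈ rs) (hp2 : p ∉ popped) :
    (nbN (liveL rs (popped ++ [p])) q : Int) =
      (nbN (liveL rs popped) q : Int) - (offAdj ADJ_B p q : Int) := by
  have hmemp : p ∈ liveL rs popped := (mem_liveL rs popped p).mpr ⟨hp1, hp2⟩
  have hsplit := countP_split ADJ_B
    (fun o => decide ((q.1 + o.1, q.2 + o.2) ∈ liveL rs popped))
    (fun o => decide ((q.1 + o.1, q.2 + o.2) = p))
  have hnew : nbN (liveL rs (popped ++ [p])) q =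
      ADJ_B.countP (fun o => decide ((q.1 + o.1, q.2 + o.2) ∈ liveL rs popped) &&
        !decide ((q.1 + o.1, q.2 + o.2) = p)) := by
    unfold nbN
    rw [live_append]
    refine List.countP_congr ?_
    intro o _
    by_cases h1 : (q.1 + o.1, q.2 + o.2) ∈ liveL rs popped <;>
      by_cases h2 : (q.1 + o.1, q.2 + o.2) = p <;>
        simp [List.mem_filter, h1, h2]
  have hrem : ADJ_B.countP (fun o => decide ((q.1 + o.1, q.2 + o.2) ∈ liveL rs popped) &&
      decide ((q.1 + o.1, q.2 + o.2) = p)) = offAdj ADJ_B p q := by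
    have hc : ∀ o ∈ ADJ_B, (decide ((q.1 + o.1, q.2 + o.2) ∈ liveL rs popped) &&
        decide ((q.1 + o.1, q.2 + o.2) = p)) = true ↔
        (decide (o = (p.1 - q.1, p.2 - q.2)) &&
          (fun o' : Int × Int => decide ((q.1 + o'.1, q.2 + o'.2) ∈ liveL rs popped)) o) = true := by
      intro o _
      have he : decide ((q.1 + o.1, q.2 + o.2) = p) = decide (o = (p.1 - q.1, p.2 - q.2)) := by
        rw [decide_eq_decide]
        simp only [Prod.ext_iff]
        omega
      rw [he, Bool.and_comm]
    rw [List.countP_congr hc,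
      countP_single ADJ_B (by decide) (p.1 - q.1, p.2 - q.2) _]
    have hqc : (q.1 + (p.1 - q.1), q.2 + (p.2 - q.2)) = p := by
      rw [Prod.ext_iff]
      constructor <;> simp <;> ring
    rw [offAdj_ADJ]
    by_cases hmem : (p.1 - q.1, p.2 - q.2) ∈ ADJ_B
    · have hmem2 : (q.1 - p.1, q.2 - p.2) ∈ ADJ_B := by
        have := ADJ_neg_mem _ hmem
        simpa [neg_sub] using this
      rw [if_pos ⟨hmem, by rw [hqc]; exact decide_eq_true hmemp⟩, if_pos hmem2]
    · have hmem2 : ¬ ((q.1 - p.1, q.2 - p.2) ∈ ADJ_B) := by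
        intro hcon
        have := ADJ_neg_mem _ hcon
        simp only [neg_sub] at this
        exact hmem this
      rw [if_neg (fun hh => hmem hh.1), if_neg hmem2]
  rw [hnew]
  unfold nbN at hsplit ⊢
  omega

-- ——— the inner 'for di, dj in ADJACENT_POSITIONS' fold preserves the worklist invariant ———
lemma fold_inv (rs : List (Int × Int)) (p : Int × Int) (popped : List (Int × Int))
    (hp1 : p ∈ rs) (hp2 : p ∉ popped) :
    ∀ (todo done : List (Int × Int)) (deg : PySem.Dict (Int × Int) Int)
      (sched pend : List (Int × Int)) (count : Int),
      done ++ todo = ADJ_B →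
      sched.Nodup → pend.Nodup →
      (∀ x ∈ sched, x ∈ rs) →
      (∀ x, x ∈ sched ↔ x ∈ popped ++ [p] ∨ x ∈ pend) →
      (∀ x ∈ popped ++ [p], x ∉ pend) →
      count = (sched.length : Int) →
      (∀ q, q ∈ rs → q ∉ sched →
        PySem.Dict.getD deg q 0 = (nbN (liveL rs popped) q : Int) - (offAdj done p q : Int) ∧
        (4 : Int) ≤ (nbN (liveL rs popped) q : Int) - (offAdj done p q : Int)) →
      (∀ S, (∀ x ∈ S, x ∈ rs) → ClosedS S → ∀ x ∈ S, x ∉ sched) →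
      ((todo.foldl (procNbr rs p) (deg, sched, pend, count)).2.1.Nodup ∧
       (todo.foldl (procNbr rs p) (deg, sched, pend, count)).2.2.1.Nodup ∧
       (∀ x ∈ (todo.foldl (procNbr rs p) (deg, sched, pend, count)).2.1, x ∈ rs) ∧
       (∀ x, x ∈ (todo.foldl (procNbr rs p) (deg, sched, pend, count)).2.1 ↔
          x ∈ popped ++ [p] ∨ x ∈ (todo.foldl (procNbr rs p) (deg, sched, pend, count)).2.2.1) ∧
       (∀ x ∈ popped ++ [p], x ∉ (todo.foldl (procNbr rs p) (deg, sched, pend, count)).2.2.1) ∧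
       (todo.foldl (procNbr rs p) (deg, sched, pend, count)).2.2.2 =
         ((todo.foldl (procNbr rs p) (deg, sched, pend, count)).2.1.length : Int) ∧
       (∀ q, q ∈ rs → q ∉ (todo.foldl (procNbr rs p) (deg, sched, pend, count)).2.1 →
         PySem.Dict.getD (todo.foldl (procNbr rs p) (deg, sched, pend, count)).1 q 0 =
           (nbN (liveL rs popped) q : Int) - (offAdj ADJ_B p q : Int) ∧
         (4 : Int) ≤ (nbN (liveL rs popped) q : Int) - (offAdj ADJ_B p q : Int)) ∧
       (∀ S, (∀ x ∈ S, x ∈ rs) → ClosedS S → ∀ x ∈ S,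
          x ∉ (todo.foldl (procNbr rs p) (deg, sched, pend, count)).2.1)) := by
  intro todo
  induction todo with
  | nil =>
    intro done deg sched pend count happ hnd1 hnd2 hsub hiff hdisj hcount hdeg hcore
    rw [List.append_nil] at happ
    subst happ
    exact ⟨hnd1, hnd2, hsub, hiff, hdisj, hcount, hdeg, hcore⟩
  | cons o todo' ih =>
    intro done deg sched pend count happ hnd1 hnd2 hsub hiff hdisj hcount hdeg hcore
    have happ' : (done ++ [o]) ++ todo' = ADJ_B := by
      rw [List.append_assoc, List.singleton_append]
      exact happ
    have hdone_sub : List.Sublist (done ++ [o]) ADJ_B := by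
      rw [← happ']
      exact List.sublist_append_left _ _
    simp only [List.foldl_cons]
    set q : Int × Int := (p.1 + o.1, p.2 + o.2) with hq
    -- offAdj bookkeeping for the new processed offset
    have hoff_self : ∀ q' : Int × Int,
        offAdj (done ++ [o]) p q' =
          offAdj done p q' + (if q = q' then 1 else 0) := by
      intro q'
      unfold offAdj
      rw [List.countP_append]
      simp only [List.countP_cons, List.countP_nil]
      by_cases hqq : q = q' <;> simp [hq ▸ hqq, hqq]
    by_cases hc : (PySem.Set.contains rs q && !(PySem.Set.contains sched q)) = true
    · obtain ⟨hin, hns⟩ := Bool.and_eq_true_iff.mp hc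
      have hqrs : q ∈ rs := (PySem.Set.contains_iff _ _).mp hin
      have hqns : q ∉ sched := by
        intro hm
        rw [(PySem.Set.contains_iff _ _).mpr hm] at hns
        simp at hns
      obtain ⟨hdq_eq, hdq_ge⟩ := hdeg q hqrs hqns
      by_cases hd : PySem.Dict.getD deg q 0 - 1 < 4
      · -- q drops below 4: it is scheduled and enqueued
        have hstep : procNbr rs p (deg, sched, pend, count) o =
            (PySem.Dict.insert deg q (PySem.Dict.getD deg q 0 - 1),
             PySem.Set.add sched q, pend ++ [q], count + 1) := by
          unfold procNbr
          rw [if_pos hc, if_pos hd]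
        rw [hstep]
        have hadd : PySem.Set.add sched q = sched ++ [q] := PySem.Set.add_of_not_mem hqns
        have hqnp : q ∉ pend := fun hm => hqns ((hiff q).mpr (Or.inr hm))
        have hq_not_closed : ∀ S, (∀ x ∈ S, x ∈ rs) → ClosedS S → q ∉ S := by
          intro S hS hSc hqS
          have hSlive : ∀ x ∈ S, x ∈ liveL rs (popped ++ [p]) := by
            intro x hx
            refine (mem_liveL _ _ _).mpr ⟨hS x hx, ?_⟩
            intro hxp
            exact hcore S hS hSc x hx ((hiff x).mpr (Or.inl hxp))
          have hm1 : nbN S q ≤ nbN (liveL rs (popped ++ [p])) q :=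
            nbN_mono _ _ hSlive q
          have hm2 := nbN_live_pop rs popped p q hp1 hp2
          have hm3 : (offAdj (done ++ [o]) p q : Int) ≤ (offAdj ADJ_B p q : Int) := by
            unfold offAdj
            exact_mod_cast List.Sublist.countP_le hdone_sub
          have hm4 := hSc q hqS
          have hoffq := hoff_self q
          simp only [if_pos rfl] at hoffq
          have k1 : ((nbN S q : Nat) : Int) ≤ ((nbN (liveL rs (popped ++ [p])) q : Nat) : Int) := by
            exact_mod_cast hm1
          have k4 : (4 : Int) ≤ ((nbN S q : Nat) : Int) := by exact_mod_cast hm4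
          have k5 : ((offAdj (done ++ [o]) p q : Nat) : Int) = ((offAdj done p q : Nat) : Int) + 1 := by
            exact_mod_cast hoffq
          omega
        refine ih (done ++ [o]) _ _ _ _ happ' ?_ ?_ ?_ ?_ ?_ ?_ ?_ ?_
        · exact PySem.Set.nodup_add sched q hnd1
        · rw [List.nodup_append]
          refine ⟨hnd2, List.nodup_singleton q, ?_⟩
          intro x hx b hb
          rw [List.mem_singleton] at hb
          intro hxb
          exact hqnp ((hxb.trans hb) ▸ hx)
        · intro x hx
          rcases (PySem.Set.mem_add _ _ _).mp hx with h | h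
          · exact hsub x h
          · exact h ▸ hqrs
        · intro x
          simp only [PySem.Set.mem_add, List.mem_append, List.mem_singleton, hiff x]
          tauto
        · intro x hx hx2
          rw [List.mem_append, List.mem_singleton] at hx2
          rcases hx2 with h | h
          · exact hdisj x hx h
          · exact hqns ((hiff q).mpr (Or.inl (h ▸ hx)))
        · rw [hadd, List.length_append, List.length_singleton]
          push_cast
          omega
        · intro q' hq'rs hq'ns
          have hq'ne : q' ≠ q := by
            intro hcon
            exact hq'ns (hcon ▸ (PySem.Set.mem_add _ _ _).mpr (Or.inr rfl))
          have hq'old : q' ∉ sched := fun hm =>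
            hq'ns ((PySem.Set.mem_add _ _ _).mpr (Or.inl hm))
          obtain ⟨he, hg⟩ := hdeg q' hq'rs hq'old
          have hoffq' := hoff_self q'
          rw [if_neg (fun hcon => hq'ne hcon.symm)] at hoffq'
          rw [PySem.Dict.getD_insert, if_neg hq'ne]
          constructor
          · rw [he, hoffq']
            push_cast
            ring
          · rw [hoffq']
            push_cast
            omega
        · intro S hS hSc x hx hxadd
          rcases (PySem.Set.mem_add _ _ _).mp hxadd with h | h
          · exact hcore S hS hSc x hx h
          · exact hq_not_closed S hS hSc (h ▸ hx)
      · -- q stays at or above 4: only its counter is decremented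
        have hstep : procNbr rs p (deg, sched, pend, count) o =
            (PySem.Dict.insert deg q (PySem.Dict.getD deg q 0 - 1),
             sched, pend, count) := by
          unfold procNbr
          rw [if_pos hc, if_neg hd]
        rw [hstep]
        refine ih (done ++ [o]) _ _ _ _ happ' hnd1 hnd2 hsub hiff hdisj hcount ?_ hcore
        intro q' hq'rs hq'ns
        have hoffq' := hoff_self q'
        by_cases hq'q : q' = q
        · subst hq'q
          rw [if_pos rfl] at hoffq'
          rw [PySem.Dict.getD_insert, if_pos rfl]
          constructor
          · rw [hdq_eq, hoffq']
            push_cast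
            ring
          · rw [hoffq']
            push_cast
            omega
        · obtain ⟨he, hg⟩ := hdeg q' hq'rs hq'ns
          rw [if_neg (fun hcon => hq'q hcon.symm)] at hoffq'
          rw [PySem.Dict.getD_insert, if_neg hq'q]
          constructor
          · rw [he, hoffq']
            push_cast
            ring
          · rw [hoffq']
            push_cast
            omega
    · -- q is not a roll or is already scheduled: nothing changes
      have hstep : procNbr rs p (deg, sched, pend, count) o = (deg, sched, pend, count) := by
        unfold procNbr
        rw [if_neg hc]
      rw [hstep]
      refine ih (done ++ [o]) _ _ _ _ happ' hnd1 hnd2 hsub hiff hdisj hcount ?_ hcore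
      intro q' hq'rs hq'ns
      have hq'ne : q ≠ q' := by
        intro hcon
        subst hcon
        apply hc
        rw [Bool.and_eq_true_iff]
        refine ⟨(PySem.Set.contains_iff _ _).mpr hq'rs, ?_⟩
        have : PySem.Set.contains sched q = false := by
          rw [← Bool.not_eq_true]
          intro hm
          exact hq'ns ((PySem.Set.contains_iff _ _).mp hm)
        rw [this]
        rfl
      obtain ⟨he, hg⟩ := hdeg q' hq'rs hq'ns
      have hoffq' := hoff_self q'
      rw [if_neg hq'ne] at hoffq'
      rw [hoffq']
      constructor
      · rw [he]
        push_cast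
        ring
      · push_cast
        omega


lemma filter_mem_length (rs sched : List (Int × Int)) (h1 : rs.Nodup) (h2 : sched.Nodup)
    (hsub : ∀ x ∈ sched, x ∈ rs) :
    (rs.filter (fun x => decide (x ∈ sched))).length = sched.length := by
  have hperm : List.Perm (rs.filter (fun x => decide (x ∈ sched))) sched :=
    (List.perm_ext_iff_of_nodup (h1.filter _) h2).mpr (fun x => by
      simp only [List.mem_filter, decide_eq_true_eq]
      exact ⟨fun h => h.2, fun h => ⟨hsub x h, h⟩⟩)
  exact hperm.length_eq

-- the final configuration of the worklist is the maximal closed subset's complement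
lemma wl_final (rs : List (Int × Int)) (hrs : rs.Nodup) (sched popped : List (Int × Int))
    (hnd1 : sched.Nodup)
    (hsub : ∀ x ∈ sched, x ∈ rs)
    (hiff : ∀ x, x ∈ sched ↔ x ∈ popped)
    (hdeg4 : ∀ q, q ∈ rs → q ∉ sched → (4 : Int) ≤ (nbN (liveL rs popped) q : Int))
    (hcore : ∀ S, (∀ x ∈ S, x ∈ rs) → ClosedS S → ∀ x ∈ S, x ∉ sched) :
    ∃ F : List (Int × Int),
      (sched.length : Int) = (rs.length : Int) - (F.length : Int) ∧
      (∀ x ∈ F, x ∈ rs) ∧ F.Nodup ∧ ClosedS F ∧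
      (∀ S, (∀ x ∈ S, x ∈ rs) → ClosedS S → ∀ x ∈ S, x ∈ F) := by
  refine ⟨rs.filter (fun x => !decide (x ∈ sched)), ?_, ?_, hrs.filter _, ?_, ?_⟩
  · have hsplit := List.length_eq_length_filter_add (l := rs) (fun x => decide (x ∈ sched))
    have hlen := filter_mem_length rs sched hrs hnd1 hsub
    push_cast
    omega
  · intro x hx
    exact (List.mem_filter.mp hx).1
  · have hFeq : rs.filter (fun x => !decide (x ∈ sched)) = liveL rs popped := by
      unfold liveL
      refine List.filter_congr ?_
      intro x _
      by_cases h : x ∈ sched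
      · simp [h, (hiff x).mp h]
      · have h2 : x ∉ popped := fun hp => h ((hiff x).mpr hp)
        simp [h, h2]
    intro pq hpq
    rw [hFeq] at hpq ⊢
    obtain ⟨hin, hnot⟩ := (mem_liveL _ _ _).mp hpq
    have hns : pq ∉ sched := fun hm => hnot ((hiff pq).mp hm)
    exact_mod_cast hdeg4 pq hin hns
  · intro S hS hSc x hx
    refine List.mem_filter.mpr ⟨hS x hx, ?_⟩
    simp [hcore S hS hSc x hx]

-- the worklist loop computes |rolls| minus the size of the maximal closed subset
lemma wl_core (rs : List (Int × Int)) (hrs : rs.Nodup) :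
    ∀ (n : Nat) (deg : PySem.Dict (Int × Int) Int) (sched pend : List (Int × Int))
      (count : Int) (popped : List (Int × Int)),
      wlM rs sched pend ≤ n →
      sched.Nodup → pend.Nodup →
      (∀ x ∈ sched, x ∈ rs) →
      (∀ x, x ∈ sched ↔ x ∈ popped ∨ x ∈ pend) →
      (∀ x ∈ popped, x ∉ pend) →
      count = (sched.length : Int) →
      (∀ q, q ∈ rs → q ∉ sched →
        PySem.Dict.getD deg q 0 = (nbN (liveL rs popped) q : Int) ∧
        (4 : Int) ≤ (nbN (liveL rs popped) q : Int)) →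
      (∀ S, (∀ x ∈ S, x ∈ rs) → ClosedS S → ∀ x ∈ S, x ∉ sched) →
      ∃ F : List (Int × Int),
        wlLoop rs deg sched pend count = (rs.length : Int) - (F.length : Int) ∧
        (∀ x ∈ F, x ∈ rs) ∧ F.Nodup ∧ ClosedS F ∧
        (∀ S, (∀ x ∈ S, x ∈ rs) → ClosedS S → ∀ x ∈ S, x ∈ F) := by
  intro n
  induction n with
  | zero =>
    intro deg sched pend count popped hm hnd1 hnd2 hsub hiff hdisj hcount hdeg hcore
    cases pend with
    | nil =>
      rw [wlLoop, hcount]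
      exact wl_final rs hrs sched popped hnd1 hsub
        (fun x => (hiff x).trans (by simp))
        (fun q h1 h2 => (hdeg q h1 h2).2) hcore
    | cons p rest =>
      exfalso
      unfold wlM at hm
      simp only [List.length_cons] at hm
      omega
  | succ n ih =>
    intro deg sched pend count popped hm hnd1 hnd2 hsub hiff hdisj hcount hdeg hcore
    cases pend with
    | nil =>
      rw [wlLoop, hcount]
      exact wl_final rs hrs sched popped hnd1 hsub
        (fun x => (hiff x).trans (by simp))
        (fun q h1 h2 => (hdeg q h1 h2).2) hcore
    | cons p rest =>
      have hp_sched : p ∈ sched := (hiff p).mpr (Or.inr List.mem_cons_self)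
      have hp_rs : p ∈ rs := hsub p hp_sched
      have hp_pop : p ∉ popped := fun hmem => (hdisj p hmem) List.mem_cons_self
      obtain ⟨hpnodup, hprest⟩ := List.nodup_cons.mp hnd2
      have hiff' : ∀ x, x ∈ sched ↔ x ∈ popped ++ [p] ∨ x ∈ rest := by
        intro x
        rw [hiff x, List.mem_append, List.mem_singleton, List.mem_cons]
        tauto
      have hdisj' : ∀ x ∈ popped ++ [p], x ∉ rest := by
        intro x hx
        rw [List.mem_append, List.mem_singleton] at hx
        rcases hx with h | h
        · intro hr
          exact hdisj x h (List.mem_cons_of_mem _ hr)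
        · exact h ▸ hpnodup
      have hdeg0 : ∀ q, q ∈ rs → q ∉ sched →
          PySem.Dict.getD deg q 0 = (nbN (liveL rs popped) q : Int) - (offAdj [] p q : Int) ∧
          (4 : Int) ≤ (nbN (liveL rs popped) q : Int) - (offAdj [] p q : Int) := by
        intro q h1 h2
        obtain ⟨e1, e2⟩ := hdeg q h1 h2
        unfold offAdj
        simp only [List.countP_nil, Nat.cast_zero, sub_zero]
        exact ⟨e1, e2⟩
      obtain ⟨f1, f2, f3, f4, f5, f6, f7, f8⟩ :=
        fold_inv rs p popped hp_rs hp_pop ADJ_B [] deg sched rest count rfl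
          hnd1 hprest hsub hiff' hdisj' hcount hdeg0 hcore
      have hmea : wlM rs (ADJ_B.foldl (procNbr rs p) (deg, sched, rest, count)).2.1
          (ADJ_B.foldl (procNbr rs p) (deg, sched, rest, count)).2.2.1 ≤ n := by
        have h1 := wl_foldl_le rs p ADJ_B (deg, sched, rest, count)
        dsimp only at h1
        have h2 : wlM rs sched rest + 1 = wlM rs sched (p :: rest) := by
          unfold wlM
          simp only [List.length_cons]
          omega
        omega
      have hdeg' : ∀ q, q ∈ rs →
          q ∉ (ADJ_B.foldl (procNbr rs p) (deg, sched, rest, count)).2.1 →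
          PySem.Dict.getD (ADJ_B.foldl (procNbr rs p) (deg, sched, rest, count)).1 q 0 =
            (nbN (liveL rs (popped ++ [p])) q : Int) ∧
          (4 : Int) ≤ (nbN (liveL rs (popped ++ [p])) q : Int) := by
        intro q h1 h2
        obtain ⟨e1, e2⟩ := f7 q h1 h2
        have hpop := nbN_live_pop rs popped p q hp_rs hp_pop
        rw [hpop]
        exact ⟨e1, e2⟩
      rw [wlLoop]
      exact ih (ADJ_B.foldl (procNbr rs p) (deg, sched, rest, count)).1
        (ADJ_B.foldl (procNbr rs p) (deg, sched, rest, count)).2.1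
        (ADJ_B.foldl (procNbr rs p) (deg, sched, rest, count)).2.2.1
        (ADJ_B.foldl (procNbr rs p) (deg, sched, rest, count)).2.2.2
        (popped ++ [p]) hmea f1 f2 f3 f4 f5 f6 hdeg' f8


-- ——— initial configuration of B ———
lemma rollsB_eq_FR (g : List (List String)) : rollsListB g = find_rolls_positions g := by
  unfold rollsListB
  simp only [PySem.List.foldl_append_ite, PySem.List.foldl_append_eq_flatMap, List.nil_append]
  rw [FR_canon]
  rw [PySem.List.enumerate_eq_map_pyRange (d := ([] : List String))]
  simp only [PySem.List.enumerate_eq_map_pyRange (d := "")]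
  simp only [List.flatMap_map, List.filter_map, List.map_map, Function.comp_def]

lemma getD_deg_init (rolls : List (Int × Int)) (f : (Int × Int) → Int) :
    ∀ x ∈ rolls,
      PySem.Dict.getD (rolls.foldl (fun d p => PySem.Dict.insert d p (f p)) PySem.Dict.empty) x 0 =
        f x := by
  induction rolls using List.reverseRecOn with
  | nil =>
    intro x hx
    simp at hx
  | append_singleton l a ih =>
    intro x hx
    rw [List.foldl_append]
    simp only [List.foldl_cons, List.foldl_nil]
    rw [PySem.Dict.getD_insert]
    by_cases hxa : x = a
    · rw [if_pos hxa, hxa]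
    · rw [if_neg hxa]
      refine ih x ?_
      rcases List.mem_append.mp hx with h | h
      · exact h
      · rw [List.mem_singleton] at h
        exact absurd h hxa

lemma degSumB_eq_nbN (rs : List (Int × Int)) (p : Int × Int) :
    degSumB rs p = (nbN rs p : Int) := by
  unfold degSumB nbN
  rw [← PySem.List.sum_map_ite_one_zero
    (fun o => decide ((p.1 + o.1, p.2 + o.2) ∈ rs)) ADJ_B]
  refine congrArg List.sum (List.map_congr_left ?_)
  intro o _
  rw [contains_decide]

lemma liveL_nil (rs : List (Int × Int)) : liveL rs [] = rs := by
  unfold liveL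
  simp

theorem count_rolls_removed_spec : Claim_equal_count_rolls_removed := by
  intro grid _ hpre
  unfold Spec_count_rolls_removed count_rolls_removed
  have hnd := nodup_FR grid
  have halt0 : count_rolls_removed_alt grid =
      wlLoop (PySem.Set.ofList (rollsListB grid))
        ((rollsListB grid).foldl
          (fun d p => PySem.Dict.insert d p (degSumB (PySem.Set.ofList (rollsListB grid)) p))
          PySem.Dict.empty)
        (PySem.Set.ofList ((rollsListB grid).filter (fun p =>
          PySem.Dict.getD ((rollsListB grid).foldl
            (fun d p => PySem.Dict.insert d p (degSumB (PySem.Set.ofList (rollsListB grid)) p))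
            PySem.Dict.empty) p 0 < 4)))
        ((rollsListB grid).filter (fun p =>
          PySem.Dict.getD ((rollsListB grid).foldl
            (fun d p => PySem.Dict.insert d p (degSumB (PySem.Set.ofList (rollsListB grid)) p))
            PySem.Dict.empty) p 0 < 4))
        (((rollsListB grid).filter (fun p =>
          PySem.Dict.getD ((rollsListB grid).foldl
            (fun d p => PySem.Dict.insert d p (degSumB (PySem.Set.ofList (rollsListB grid)) p))
            PySem.Dict.empty) p 0 < 4)).length : Int) := rfl
  rw [halt0, rollsB_eq_FR grid, PySem.Set.ofList_eq_self_of_nodup _ hnd]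
  have hqeq : (find_rolls_positions grid).filter (fun p =>
      PySem.Dict.getD ((find_rolls_positions grid).foldl
        (fun d p => PySem.Dict.insert d p (degSumB (find_rolls_positions grid) p))
        PySem.Dict.empty) p 0 < 4) =
      (find_rolls_positions grid).filter (peelP (find_rolls_positions grid)) := by
    refine List.filter_congr ?_
    intro p hp
    rw [getD_deg_init (find_rolls_positions grid) _ p hp,
      degSumB_eq_nbN (find_rolls_positions grid) p]
    unfold peelP
    rw [decide_eq_decide]
    constructor <;> intro h <;> exact_mod_cast h
  rw [hqeq, PySem.Set.ofList_eq_self_of_nodup _ (hnd.filter _)]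
  rcases hpre with hrect | hno
  · -- rectangular grid: both sides compute |rolls| − |4-core|
    rw [loopA_peel (find_rolls_positions grid).length grid 0 le_rfl hrect]
    obtain ⟨F1, hB1, hB2, hB3, hB4, hB5⟩ :=
      peelLoop_core (find_rolls_positions grid).length (find_rolls_positions grid) 0 le_rfl hnd
    have hQ := hnd.filter (peelP (find_rolls_positions grid))
    have hQsub : ∀ x ∈ (find_rolls_positions grid).filter (peelP (find_rolls_positions grid)),
        x ∈ find_rolls_positions grid := fun x hx => (List.mem_filter.mp hx).1
    have hdeginit : ∀ q, q ∈ find_rolls_positions grid →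
        q ∉ (find_rolls_positions grid).filter (peelP (find_rolls_positions grid)) →
        PySem.Dict.getD ((find_rolls_positions grid).foldl
          (fun d p => PySem.Dict.insert d p (degSumB (find_rolls_positions grid) p))
          PySem.Dict.empty) q 0 =
          (nbN (liveL (find_rolls_positions grid) []) q : Int) ∧
        (4 : Int) ≤ (nbN (liveL (find_rolls_positions grid) []) q : Int) := by
      intro q h1 h2
      rw [liveL_nil]
      have hnp : ¬ (peelP (find_rolls_positions grid) q = true) := by
        intro hc
        exact h2 (List.mem_filter.mpr ⟨h1, hc⟩)
      unfold peelP at hnp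
      rw [decide_eq_true_eq] at hnp
      refine ⟨?_, by exact_mod_cast Nat.le_of_not_lt hnp⟩
      rw [getD_deg_init (find_rolls_positions grid) _ q h1,
        degSumB_eq_nbN (find_rolls_positions grid) q]
    have hcoreinit : ∀ S, (∀ x ∈ S, x ∈ find_rolls_positions grid) → ClosedS S →
        ∀ x ∈ S, x ∉ (find_rolls_positions grid).filter (peelP (find_rolls_positions grid)) := by
      intro S hS hSc x hx hxq
      have h4 := hSc x hx
      have hmono := nbN_mono S (find_rolls_positions grid) hS x
      have hxp := (List.mem_filter.mp hxq).2
      unfold peelP at hxp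
      rw [decide_eq_true_eq] at hxp
      omega
    obtain ⟨F2, hW1, hW2, hW3, hW4, hW5⟩ :=
      wl_core (find_rolls_positions grid) hnd
        (wlM (find_rolls_positions grid)
          ((find_rolls_positions grid).filter (peelP (find_rolls_positions grid)))
          ((find_rolls_positions grid).filter (peelP (find_rolls_positions grid)))) _ _ _ _ []
        le_rfl hQ hQ hQsub (fun x => by simp) (by simp) rfl hdeginit hcoreinit
    rw [hB1, hW1, core_length_eq (find_rolls_positions grid) F1 F2 hB2 hB3 hB4 hB5 hW2 hW3 hW4 hW5]
    ring
  · -- ragged but roll-free grid: both sides are 0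
    have hFR := FR_nil_of_noRoll grid hno
    rw [removeLoopA]
    have hacc : find_accessible_rolls_positions grid = [] := by
      unfold find_accessible_rolls_positions
      rw [hFR]
      rfl
    rw [dif_pos hacc, hFR]
    simp only [List.filter_nil]
    rw [wlLoop]
    simp
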